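-- pv_equiv track=rewrite | github.com/Lost-MSth/Lost | PH/CCBC 16/千字谜.py | col_5
-- ===== SOURCE A (Python) =====
-- def col_5(text, HEIGHT=10, WIDTH=10):
--     # 在正方形网格内从右往左竖排，然后按照横排顺序读。
--     grid = [[None] * WIDTH for _ in range(HEIGHT)]
--     i = 0
--     for col in range(WIDTH - 1, -1, -1):
--         for row in range(HEIGHT):
--             grid[row][col] = text[i]
--             i += 1
--
--     # flat grid
--     return [cell for row in grid for cell in row if cell is not None]
-- ===== SOURCE B (Python) =====
-- def col_5(text, HEIGHT=10, WIDTH=10):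
--     # Direct index formula: the character read at (row, col) was written from
--     # text[(WIDTH-1-col)*HEIGHT + row]; no intermediate grid is built.
--     return [text[(WIDTH - 1 - col) * HEIGHT + row]
--             for row in range(HEIGHT) for col in range(WIDTH)]
-- ===== Notes on version B (the rewrite author's own statement) =====
-- stated objective: simpler
-- what changed: B emits each output character directly via the closed-form source index (WIDTH-1-col)*HEIGHT+row instead of building and mutating a 2-D None-grid and flattening/filtering it.
import Mathlib
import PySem

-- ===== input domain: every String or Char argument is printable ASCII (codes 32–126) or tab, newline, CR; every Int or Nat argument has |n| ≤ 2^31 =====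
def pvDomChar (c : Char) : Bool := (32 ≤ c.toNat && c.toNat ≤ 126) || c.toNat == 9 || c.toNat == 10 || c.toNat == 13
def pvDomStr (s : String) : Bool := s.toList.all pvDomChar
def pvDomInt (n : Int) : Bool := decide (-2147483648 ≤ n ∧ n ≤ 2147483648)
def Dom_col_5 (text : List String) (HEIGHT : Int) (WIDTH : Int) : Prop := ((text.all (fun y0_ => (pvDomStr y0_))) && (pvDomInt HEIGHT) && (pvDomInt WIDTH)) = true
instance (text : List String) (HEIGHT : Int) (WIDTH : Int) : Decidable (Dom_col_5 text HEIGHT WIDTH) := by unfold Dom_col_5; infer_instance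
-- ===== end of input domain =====

-- B computes each output character directly from the closed-form source index
-- (WIDTH-1-col)*HEIGHT+row, instead of filling and flattening a mutable 2-D grid (objective: simpler).


-- ===== PORT A =====
-- grid = [[None]*WIDTH for _ in range(HEIGHT)]; grid[row][col] = text[i]; i += 1; then flatten with the
-- 'cell is not None' filter.  'text[i]' is PySem.List.pyGet?; its IndexError (none) is totalized with
-- .getD "" — reached only outside Pre_col_5.
def col_5 (text : List String) (HEIGHT : Int) (WIDTH : Int) : List String :=
  let grid0 : List (List (Option String)) :=
    (PySem.List.pyRange 0 HEIGHT 1).map (fun _ => List.replicate WIDTH.toNat (none : Option String))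
  let st :=
    (PySem.List.pyRange (WIDTH - 1) (-1) (-1)).foldl
      (fun (st : List (List (Option String)) × Int) col =>
        (PySem.List.pyRange 0 HEIGHT 1).foldl
          (fun (st2 : List (List (Option String)) × Int) row =>
            (st2.1.modify row.toNat
               (fun r => r.set col.toNat (some ((PySem.List.pyGet? text st2.2).getD ""))),
             st2.2 + 1))
          st)
      (grid0, 0)
  st.1.flatMap (fun row => row.filterMap (fun cell => cell))

-- ===== PORT B =====
-- [text[(WIDTH-1-col)*HEIGHT + row] for row in range(HEIGHT) for col in range(WIDTH)];
-- the same .getD "" totalization of IndexError, reached only outside Pre_col_5.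
def col_5_alt (text : List String) (HEIGHT : Int) (WIDTH : Int) : List String :=
  (PySem.List.pyRange 0 HEIGHT 1).flatMap (fun row =>
    (PySem.List.pyRange 0 WIDTH 1).map (fun col =>
      (PySem.List.pyGet? text ((WIDTH - 1 - col) * HEIGHT + row)).getD ""))

-- ===== PRECONDITION & SPEC =====
-- Pre_ excludes exactly the inputs where the Python A raises IndexError:
-- a positive grid (HEIGHT > 0 and WIDTH > 0) with text shorter than HEIGHT*WIDTH.
def Pre_col_5 (text : List String) (HEIGHT : Int) (WIDTH : Int) : Prop :=
  HEIGHT ≤ 0 ∨ WIDTH ≤ 0 ∨ HEIGHT * WIDTH ≤ (text.length : Int)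
instance (text : List String) (HEIGHT : Int) (WIDTH : Int) : Decidable (Pre_col_5 text HEIGHT WIDTH) := by unfold Pre_col_5; infer_instance
def pvWitness_col_5 : List String × Int × Int := (["a", "b", "c", "d", "e", "f"], 2, 3)

def Spec_col_5 (text : List String) (HEIGHT : Int) (WIDTH : Int) (out : List String) : Prop := out = col_5_alt text HEIGHT WIDTH
instance (text : List String) (HEIGHT : Int) (WIDTH : Int) (out : List String) : Decidable (Spec_col_5 text HEIGHT WIDTH out) := by unfold Spec_col_5; infer_instance

-- ===== CLAIM (what is proved, stated in full; the proofs are below) =====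
def Claim_equal_col_5 : Prop := ∀ (text : List String) (HEIGHT : Int) (WIDTH : Int), Dom_col_5 text HEIGHT WIDTH → Pre_col_5 text HEIGHT WIDTH → Spec_col_5 text HEIGHT WIDTH (col_5 text HEIGHT WIDTH)

-- ===== LEMMAS AND PROOFS =====

-- descending list [n-1, n-2, …, 0]
def pvDesc : Nat → List Nat
  | 0 => []
  | n + 1 => n :: pvDesc n

theorem pvDescLen (n : Nat) : (pvDesc n).length = n := by
  induction n with
  | zero => rfl
  | succ m ih => simp [pvDesc, ih]

theorem pvDescGet (n : Nat) : ∀ (i : Nat) (h : i < (pvDesc n).length), (pvDesc n)[i] = n - 1 - i := by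
  induction n with
  | zero => intro i h; simp [pvDesc] at h
  | succ m ih =>
    intro i h
    cases i with
    | zero => simp [pvDesc]
    | succ j =>
      have hj : j < (pvDesc m).length := by
        simpa [pvDesc] using h
      simp only [pvDesc, List.getElem_cons_succ, ih j hj]
      omega

theorem pvDescEq (n : Nat) :
    (List.range n).map (fun (k : Nat) => (n : Int) - 1 - (k : Int)) = (pvDesc n).map (fun (j : Nat) => (j : Int)) := by
  apply List.ext_getElem
  · simp [pvDescLen]
  · intro i h1 h2
    have hi : i < n := by simpa using h1
    have hp : i < (pvDesc n).length := by simpa [pvDescLen] using hi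
    simp only [List.getElem_map, List.getElem_range, pvDescGet n i hp]
    omega

theorem pvMapIdxId {α : Type} (l : List α) : l.mapIdx (fun _ x => x) = l := by
  apply List.ext_getElem
  · simp
  · intro i h1 h2; simp

-- one inner pass (the 'for row in range(HEIGHT)' loop) over rows a, a+1, …, a+k-1
theorem pvInner (v : Int → Option String) (c : Nat) :
    ∀ (k a : Nat) (g : List (List (Option String))) (i0 : Int),
    List.foldl
      (fun (st2 : List (List (Option String)) × Int) (r : Nat) =>
        (st2.1.modify r (fun row => row.set c (v st2.2)), st2.2 + 1))
      (g, i0) (List.range' a k)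
    = (g.mapIdx (fun r row =>
        if a ≤ r ∧ r < a + k then row.set c (v (i0 + ((r - a : Nat) : Int))) else row), i0 + k) := by
  intro k
  induction k with
  | zero =>
    intro a g i0
    simp only [List.range'_zero, List.foldl_nil]
    rw [show (g.mapIdx fun r row => if a ≤ r ∧ r < a + 0 then row.set c (v (i0 + ((r - a : Nat) : Int))) else row)
          = g.mapIdx (fun _ x => x) from ?_, pvMapIdxId]
    · simp
    · apply List.mapIdx_eq_mapIdx_iff.mpr
      intro i h
      simp
  | succ m ih =>
    intro a g i0
    rw [List.range'_succ, List.foldl_cons, ih (a + 1)]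
    dsimp only
    refine Prod.ext ?_ ?_
    · apply List.ext_getElem
      · simp
      · intro r h1 h2
        simp only [List.getElem_mapIdx, List.getElem_modify]
        by_cases hra : a = r
        · subst hra
          have hc1 : ¬ (a + 1 ≤ a ∧ a < a + 1 + m) := by omega
          have hc2 : a ≤ a ∧ a < a + (m + 1) := by omega
          simp [hc2]
        · have he : (a + 1 ≤ r ∧ r < a + 1 + m) ↔ (a ≤ r ∧ r < a + (m + 1)) := by omega
          by_cases hr : a ≤ r ∧ r < a + (m + 1)
          · have hr' := he.mpr hr
            rw [if_pos hr', if_neg hra, if_pos hr]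
            have harg : i0 + 1 + ((r - (a + 1) : Nat) : Int) = i0 + ((r - a : Nat) : Int) := by omega
            rw [harg]
          · have hr' : ¬ (a + 1 ≤ r ∧ r < a + 1 + m) := fun x => hr (he.mp x)
            rw [if_neg hr', if_neg hra, if_neg hr]
    · push_cast; ring

-- the whole double loop: n columns w-1, w-2, …, 0 over a grid of h rows
theorem pvOuter (v : Int → Option String) (h : Nat) :
    ∀ (n : Nat) (g : List (List (Option String))) (i0 : Int), g.length = h →
    List.foldl
      (fun (st : List (List (Option String)) × Int) (c : Nat) =>
        List.foldl
          (fun (st2 : List (List (Option String)) × Int) (r : Nat) =>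
            (st2.1.modify r (fun row => row.set c (v st2.2)), st2.2 + 1))
          st (List.range' 0 h))
      (g, i0) (pvDesc n)
    = (g.mapIdx (fun r row => row.mapIdx (fun c x =>
        if c < n then v (i0 + (((n - 1 - c) * h + r : Nat) : Int)) else x)), i0 + (n * h : Nat)) := by
  intro n
  induction n with
  | zero =>
    intro g i0 hg
    simp only [pvDesc, List.foldl_nil]
    rw [show (g.mapIdx fun r row => row.mapIdx fun c x =>
          if c < 0 then v (i0 + (((0 - 1 - c) * h + r : Nat) : Int)) else x)
        = g.mapIdx (fun _ x => x) from ?_, pvMapIdxId]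
    · simp
    · apply List.mapIdx_eq_mapIdx_iff.mpr
      intro i hi
      simp [pvMapIdxId]
  | succ m ih =>
    intro g i0 hg
    simp only [pvDesc, List.foldl_cons]
    rw [pvInner v m h 0 g i0, ih _ _ (by simp [hg])]
    refine Prod.ext ?_ ?_
    · apply List.ext_getElem
      · simp
      · intro r h1 h2
        simp only [List.getElem_mapIdx]
        have hr : r < h := by simpa [hg] using (by simpa using h1 : r < g.length)
        have hra : 0 ≤ r ∧ r < 0 + h := ⟨Nat.zero_le r, by omega⟩
        simp only [hra, if_pos, and_self]
        apply List.ext_getElem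
        · simp
        · intro c hc1 hc2
          simp only [List.getElem_mapIdx, List.getElem_set]
          by_cases hcm : c = m
          · subst hcm
            have e1 : ¬ (c < c) := by omega
            have e2 : c < c + 1 := by omega
            have e3 : c + 1 - 1 - c = 0 := by omega
            simp [e2]
          · by_cases hlt : c < m
            · have hlt' : c < m + 1 := by omega
              have harg : i0 + (h : Int) + (((m - 1 - c) * h + r : Nat) : Int)
                  = i0 + (((m + 1 - 1 - c) * h + r : Nat) : Int) := by
                have : h + ((m - 1 - c) * h + r) = (m + 1 - 1 - c) * h + r := by
                  have e : m + 1 - 1 - c = (m - 1 - c) + 1 := by omega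
                  rw [e, Nat.succ_mul]; omega
                omega
              simp only [hlt, hlt', if_pos, if_neg (by omega : ¬ m = c)]
              congr 1
            · have h1' : ¬ c < m + 1 := by omega
              simp [hlt, h1', if_neg (by omega : ¬ m = c)]
    · push_cast; ring

theorem pvMapIdxMapRange' {α β : Type} (n : Nat) (g : Nat → α) (f : Nat → α → β) :
    List.mapIdx f ((List.range' 0 n).map g) = (List.range' 0 n).map (fun i => f i (g i)) := by
  apply List.ext_getElem
  · simp
  · intro i h1 h2
    simp

-- ===== VERDICT (by name: the statement is the Claim_ definition above) =====
theorem col_5_spec : Claim_equal_col_5 := by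
  intro text HEIGHT WIDTH _ hpre
  unfold Spec_col_5
  by_cases hH : HEIGHT ≤ 0
  · unfold col_5 col_5_alt
    rw [PySem.List.pyRange_one_eq_nil (by omega : HEIGHT ≤ 0)]
    simp
  · by_cases hW : WIDTH ≤ 0
    · unfold col_5 col_5_alt
      rw [PySem.List.pyRange_neg_one_eq_nil (by omega : WIDTH - 1 ≤ -1),
          PySem.List.pyRange_one_eq_nil (by omega : WIDTH ≤ 0)]
      simp only [Int.toNat_of_nonpos hW]
      refine Eq.trans (b := ([] : List String)) ?_ ?_
      · rw [List.flatMap_eq_nil_iff]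
        intro x hx
        simp only [List.foldl_nil] at hx
        obtain ⟨y, -, rfl⟩ := List.mem_map.mp hx
        rfl
      · symm
        rw [List.flatMap_eq_nil_iff]
        intro x hx
        rfl
    · push Not at hH hW
      have hlen : HEIGHT * WIDTH ≤ (text.length : Int) := by
        rcases hpre with h1 | h1 | h1
        · omega
        · omega
        · exact h1
      obtain ⟨h, hHe⟩ : ∃ n : Nat, HEIGHT = (n : Int) :=
        ⟨HEIGHT.toNat, (Int.toNat_of_nonneg (le_of_lt hH)).symm⟩
      obtain ⟨w, hWe⟩ : ∃ n : Nat, WIDTH = (n : Int) :=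
        ⟨WIDTH.toNat, (Int.toNat_of_nonneg (le_of_lt hW)).symm⟩
      subst hHe hWe
      unfold col_5 col_5_alt
      have hpr : PySem.List.pyRange 0 (h : Int) 1 = (List.range' 0 h).map (fun (k : Nat) => (k : Int)) := by
        rw [PySem.List.pyRange_one, ← List.range_eq_range']
        simp
      have hpw : PySem.List.pyRange 0 (w : Int) 1 = (List.range' 0 w).map (fun (k : Nat) => (k : Int)) := by
        rw [PySem.List.pyRange_one, ← List.range_eq_range']
        simp
      have hneg : PySem.List.pyRange ((w : Int) - 1) (-1) (-1) = (pvDesc w).map (fun (j : Nat) => (j : Int)) := by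
        rw [PySem.List.pyRange_neg_one, show ((w : Int) - 1 - (-1)) = (w : Int) by ring,
            Int.toNat_natCast, List.range_eq_range', ← pvDescEq, List.range_eq_range']
      rw [hpr, hpw, hneg]
      simp only [List.foldl_map, List.map_map, Function.comp_def, Int.toNat_natCast]
      rw [pvOuter (fun i => some ((PySem.List.pyGet? text i).getD "")) h w
            ((List.range' 0 h).map (fun _ => List.replicate w (none : Option String))) 0
            (by simp)]
      rw [pvMapIdxMapRange']
      have hrep : List.replicate w (none : Option String) = (List.range' 0 w).map (fun _ => none) := by
        rw [List.map_const', List.length_range']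
      simp only [hrep, pvMapIdxMapRange']
      simp only [List.flatMap_def, List.map_map, Function.comp_def]
      congr 1
      apply List.map_congr_left
      intro r hr
      have hrh : r < h := by
        have := List.mem_range'.mp hr
        omega
      have hrow : (List.range' 0 w).map
            (fun c => if c < w then
              (fun i => some ((PySem.List.pyGet? text i).getD "")) ((0 : Int) + (((w - 1 - c) * h + r : Nat) : Int))
            else (none : Option String))
          = (List.range' 0 w).map (fun (c : Nat) =>
              some ((PySem.List.pyGet? text (((w : Int) - 1 - (c : Int)) * (h : Int) + (r : Int))).getD "")) := by
        apply List.map_congr_left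
        intro c hc
        have hcw : c < w := by
          have := List.mem_range'.mp hc
          omega
        rw [if_pos hcw]
        simp only []
        congr 3
        rw [zero_add,
            show (((w - 1 - c) * h + r : Nat) : Int) = ((w - 1 - c : Nat) : Int) * (h : Int) + (r : Int) by push_cast; ring,
            show ((w - 1 - c : Nat) : Int) = (w : Int) - 1 - (c : Int) by omega]
      rw [hrow]
      simp [List.filterMap_map]
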